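-- pv_equiv track=rewrite | github.com/JoseR1205/sp_labo_a111_nunez_mita | pygame_tema2/modulos.py | total_premio
-- ===== SOURCE A (Python) =====
-- def total_premio(nivel:int):
--     """
--        total_premio(nivel:int)
--        nivel: se ingresa por parametro el nivel en el que se desea calcular el premio obtenido
--        la funcion valida cual es el premio obtenido en la hasta el momento, se usa varios for en momentos donde se cumple un patron de premio
--        retorna el numero con el premio
--     """
--     premio = 0
--     if nivel < 4 and nivel > 0:
--         for _ in range(nivel):
--             premio +=100
--     if nivel >= 4 and nivel < 12:
--         repeticiones = nivel - 4
--         premio = 500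
--         if repeticiones > 0:
--             for _ in range(repeticiones):
--                 premio *=2
--     if nivel >= 12 and nivel < 15:
--         repeticiones = nivel - 13
--         premio = 125000
--         if repeticiones > 0:
--             premio *=2
--     return premio
-- ===== SOURCE B (Python) =====
-- def total_premio(nivel: int):
--     if 0 < nivel < 4:
--         return 100 * nivel
--     if 4 <= nivel < 12:
--         return 500 * 2 ** (nivel - 4)
--     if 12 <= nivel < 15:
--         return 250000 if nivel == 14 else 125000
--     return 0
-- ===== Notes on version B (the rewrite author's own statement) =====
-- stated objective: simpler
-- what changed: Replaced A's accumulation loops (repeated adding and doubling) with a direct closed-form branch on the level ranges: a linear term, a power of two, or one of two fixed prizes.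
import Mathlib
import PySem

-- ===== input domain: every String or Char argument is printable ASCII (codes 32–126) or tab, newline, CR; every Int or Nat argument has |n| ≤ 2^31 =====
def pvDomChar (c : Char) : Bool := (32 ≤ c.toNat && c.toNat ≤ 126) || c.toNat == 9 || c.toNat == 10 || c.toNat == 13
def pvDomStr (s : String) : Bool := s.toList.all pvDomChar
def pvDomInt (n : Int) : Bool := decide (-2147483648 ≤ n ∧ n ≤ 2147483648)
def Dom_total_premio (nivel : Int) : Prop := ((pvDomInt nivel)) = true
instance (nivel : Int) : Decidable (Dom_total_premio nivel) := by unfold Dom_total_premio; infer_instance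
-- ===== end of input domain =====

-- ===== PORT A =====
-- literal transliteration of A: the three range-loops become foldl over PySem.List.pyRange
def total_premio (nivel : Int) : Int :=
  let premio : Int := 0
  let premio :=
    if nivel < 4 ∧ nivel > 0 then
      (PySem.List.pyRange 0 nivel 1).foldl (fun p _ => p + 100) premio
    else premio
  let premio :=
    if nivel ≥ 4 ∧ nivel < 12 then
      let repeticiones := nivel - 4
      let premio : Int := 500
      if repeticiones > 0 then
        (PySem.List.pyRange 0 repeticiones 1).foldl (fun p _ => p * 2) premio
      else premio
    else premio
  let premio :=
    if nivel ≥ 12 ∧ nivel < 15 then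
      let repeticiones := nivel - 13
      let premio : Int := 125000
      if repeticiones > 0 then premio * 2 else premio
    else premio
  premio

-- ===== PORT B =====
-- B: closed-form branch, no loops (objective: simpler)
def total_premio_alt (nivel : Int) : Int :=
  if 0 < nivel ∧ nivel < 4 then 100 * nivel
  else if 4 ≤ nivel ∧ nivel < 12 then 500 * 2 ^ (nivel - 4).toNat
  else if 12 ≤ nivel ∧ nivel < 15 then (if nivel = 14 then 250000 else 125000)
  else 0

-- ===== PRECONDITION & SPEC =====
def Spec_total_premio (nivel : Int) (out : Int) : Prop := out = total_premio_alt nivel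
instance (nivel : Int) (out : Int) : Decidable (Spec_total_premio nivel out) := by unfold Spec_total_premio; infer_instance

-- ===== CLAIM (what is proved, stated in full; the proofs are below) =====
def Claim_equal_total_premio : Prop := ∀ (nivel : Int), Dom_total_premio nivel → Spec_total_premio nivel (total_premio nivel)

-- ===== LEMMAS AND PROOFS =====

-- ===== VERDICT (by name: the statement is the Claim_ definition above) =====
theorem total_premio_spec : Claim_equal_total_premio := by
  unfold Claim_equal_total_premio Spec_total_premio
  intro n _
  by_cases h : 0 < n ∧ n < 15
  · obtain ⟨h1, h2⟩ := h
    interval_cases n <;> decide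
  · simp only [total_premio, total_premio_alt]
    split_ifs <;> omega
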